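-- pv_equiv track=rewrite | github.com/pamidibindukumar/adventofcode | 2025/day8.py | part2
-- ===== SOURCE A (Python) =====
-- class DSU:
--     def __init__(self, n):
--         self.parent = list(range(n))
--         self.size = [1] * n
--         self.components = n  # how many separate circuits
--
--     def find(self, x):
--         # path compression
--         while self.parent[x] != x:
--             self.parent[x] = self.parent[self.parent[x]]
--             x = self.parent[x]
--         return x
--
--     def union(self, a, b):
--         ra = self.find(a)
--         rb = self.find(b)
--         if ra == rb:
--             return False  # already same circuit, no change
--         # union by size
--         if self.size[ra] < self.size[rb]:
--             ra, rb = rb, ra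
--         self.parent[rb] = ra
--         self.size[ra] += self.size[rb]
--         self.components -= 1
--         return True
--
-- def part2(points, edges):
--     """
--     Continue connecting closest pairs until all junction boxes
--     form a single circuit. Return product of X coordinates of
--     the last two junction boxes that needed to be connected.
--     """
--     n = len(points)
--     dsu = DSU(n)
--     last_pair = None  # indices (i, j) of last successful union
--
--     for _, a, b in edges:
--         merged = dsu.union(a, b)
--         if not merged:
--             continue  # already in same circuit, skip
--         # this connection actually merged two circuits
--         last_pair = (a, b)
--         if dsu.components == 1:
--             break
--
--     if last_pair is None:
--         raise RuntimeError("All boxes were already connected?")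
--
--     i, j = last_pair
--     x1 = points[i][0]
--     x2 = points[j][0]
--     return x1 * x2
-- ===== SOURCE B (Python) =====
-- def part2(points, edges):
--     """
--     Continue connecting closest pairs until all junction boxes
--     form a single circuit. Return product of X coordinates of
--     the last two junction boxes that needed to be connected.
--     """
--     n = len(points)
--     comp = list(range(n))  # flat component label per box
--     count = n              # distinct components
--     last_pair = None
--
--     for _, a, b in edges:
--         ca, cb = comp[a], comp[b]
--         if ca == cb:
--             continue  # already in same circuit
--         comp = [ca if c == cb else c for c in comp]
--         count -= 1
--         last_pair = (a, b)
--         if count == 1: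
--             break
--
--     if last_pair is None:
--         raise RuntimeError("All boxes were already connected?")
--
--     i, j = last_pair
--     return points[i][0] * points[j][0]
-- ===== Notes on version B (the rewrite author's own statement) =====
-- stated objective: alternative
-- what changed: Replaces A's size-balanced, path-compressing union-find forest (parent/size arrays, find loop with compression) by a flat component-label array that is scanned and relabelled on each merge (quick-find), keeping the same merge order, early break and final product.
import Mathlib
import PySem

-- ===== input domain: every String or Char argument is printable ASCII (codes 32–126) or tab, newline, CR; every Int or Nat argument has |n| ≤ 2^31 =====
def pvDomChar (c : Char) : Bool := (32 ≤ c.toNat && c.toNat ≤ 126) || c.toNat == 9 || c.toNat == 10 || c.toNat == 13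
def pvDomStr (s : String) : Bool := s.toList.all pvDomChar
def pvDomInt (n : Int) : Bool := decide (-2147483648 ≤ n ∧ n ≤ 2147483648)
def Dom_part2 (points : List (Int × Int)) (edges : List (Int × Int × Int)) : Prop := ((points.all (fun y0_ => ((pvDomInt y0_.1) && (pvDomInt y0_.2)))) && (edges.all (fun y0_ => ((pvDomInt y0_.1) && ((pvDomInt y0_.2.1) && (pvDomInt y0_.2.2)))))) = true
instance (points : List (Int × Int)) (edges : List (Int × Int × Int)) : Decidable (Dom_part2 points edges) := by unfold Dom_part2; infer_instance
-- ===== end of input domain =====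

-- B replaces A's size-balanced, path-compressing union-find forest by a flat component
-- labelling that is relabelled on each merge (quick-find); same return value, no speed claim.

-- shared indexing helpers: Python's xs[i] (negative = from the end; default 0 outside
-- the range, such reads never happen on inputs admitted by Pre_) and xs[i] = v assignment
def pg (p : List Int) (x : Int) : Int := (PySem.List.pyGet? p x).getD 0
def slot (n : Nat) (x : Int) : Nat := (if x < 0 then x + (n : Int) else x).toNat
def setI (p : List Int) (x v : Int) : List Int := p.set (slot p.length x) v

-- ===== PORT A =====
-- DSU.find with path compression; fuel n+1 suffices (a find path never revisits a node)
def findA (p : List Int) (x : Int) : Nat → Int × List Int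
  | 0 => (x, p)
  | fuel+1 =>
    if pg p x = x then (x, p)
    else
      let p1 := setI p x (pg p (pg p x))
      findA p1 (pg p1 x) fuel

-- DSU.union: returns (merged, parent, size, components)
def unionA (p size : List Int) (comps : Int) (a b : Int) : Bool × List Int × List Int × Int :=
  let fa := findA p a (p.length + 1)
  let ra := fa.1
  let fb := findA fa.2 b (fa.2.length + 1)
  let rb := fb.1
  let p2 := fb.2
  if ra = rb then (false, p2, size, comps)
  else
    let pr := if pg size ra < pg size rb then (rb, ra) else (ra, rb)
    (true, setI p2 pr.2 pr.1, setI size pr.1 (pg size pr.1 + pg size pr.2), comps - 1)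

-- the 'for _, a, b in edges' loop with the early break
def loopA : List (Int × Int × Int) → List Int → List Int → Int → Option (Int × Int) → List Int × List Int × Int × Option (Int × Int)
  | [], p, size, comps, last => (p, size, comps, last)
  | (_, a, b) :: rest, p, size, comps, last =>
    let u := unionA p size comps a b
    if u.1 then
      if u.2.2.2 = 1 then (u.2.1, u.2.2.1, u.2.2.2, some (a, b))
      else loopA rest u.2.1 u.2.2.1 u.2.2.2 (some (a, b))
    else loopA rest u.2.1 u.2.2.1 u.2.2.2 last

def part2 (points : List (Int × Int)) (edges : List (Int × Int × Int)) : Int :=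
  let n := points.length
  let st := loopA edges ((List.range n).map Int.ofNat) (List.replicate n 1) (n : Int) none
  match st.2.2.2 with
  | none => 0  -- Python raises RuntimeError here; excluded by Pre_part2
  | some (i, j) => ((PySem.List.pyGet? points i).getD (0, 0)).1 * ((PySem.List.pyGet? points j).getD (0, 0)).1

-- ===== PORT B =====
-- flat labelling: comp[a] == comp[b] decides 'same circuit'; a merge relabels the whole class
def loopB : List (Int × Int × Int) → List Int → Int → Option (Int × Int) → List Int × Int × Option (Int × Int)
  | [], comp, count, last => (comp, count, last)
  | (_, a, b) :: rest, comp, count, last =>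
    let ca := pg comp a
    let cb := pg comp b
    if ca = cb then loopB rest comp count last
    else
      let comp' := comp.map (fun c => if c = cb then ca else c)
      if count - 1 = 1 then (comp', count - 1, some (a, b))
      else loopB rest comp' (count - 1) (some (a, b))

def part2_alt (points : List (Int × Int)) (edges : List (Int × Int × Int)) : Int :=
  let n := points.length
  let st := loopB edges ((List.range n).map Int.ofNat) (n : Int) none
  match st.2.2 with
  | none => 0  -- Python raises RuntimeError here; excluded by Pre_part2
  | some (i, j) => ((PySem.List.pyGet? points i).getD (0, 0)).1 * ((PySem.List.pyGet? points j).getD (0, 0)).1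

-- ===== PRECONDITION & SPEC =====
-- spec-level helpers for Pre_: normalised index, per-edge range/merge checks, and a plain
-- BFS-style reachability closure deciding connectivity of an edge prefix (independent of
-- both ports' algorithms)
def normI (n : Nat) (x : Int) : Int := if x < 0 then x + n else x
def inRangeE (n : Nat) (e : Int × Int × Int) : Bool :=
  decide (-(n : Int) ≤ e.2.1 ∧ e.2.1 < n ∧ -(n : Int) ≤ e.2.2 ∧ e.2.2 < n)
def mergeE (n : Nat) (e : Int × Int × Int) : Bool :=
  inRangeE n e && decide (normI n e.2.1 ≠ normI n e.2.2)
def addV (s : List Nat) (v : Nat) : List Nat := if v ∈ s then s else v :: s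
def grow (ps : List (Nat × Nat)) (s : List Nat) : List Nat :=
  ps.foldl (fun s p => if p.1 ∈ s ∨ p.2 ∈ s then addV (addV s p.1) p.2 else s) s
def npairs (n : Nat) (es : List (Int × Int × Int)) : List (Nat × Nat) :=
  es.map (fun e => ((normI n e.2.1).toNat, (normI n e.2.2).toNat))
def connectedB (n : Nat) (es : List (Int × Int × Int)) : Bool :=
  (List.range n).all (fun v => v ∈ (grow (npairs n es))^[n] [0])

-- Pre_ admits exactly the inputs on which the Python A returns: either every edge is in
-- range and some edge joins two distinct boxes, or some in-range edge prefix already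
-- connects all boxes (so the loop breaks before any later out-of-range edge is read);
-- excluded are only the inputs where A raises IndexError or RuntimeError.
def Pre_part2 (points : List (Int × Int)) (edges : List (Int × Int × Int)) : Prop :=
  ((edges.all (inRangeE points.length) && edges.any (mergeE points.length)) ||
   (decide (2 ≤ points.length) &&
    (List.range edges.length).any
      (fun k => (edges.take k).all (inRangeE points.length) &&
                connectedB points.length (edges.take k)))) = true
instance (points : List (Int × Int)) (edges : List (Int × Int × Int)) : Decidable (Pre_part2 points edges) := by unfold Pre_part2; infer_instance

def pvWitness_part2 : (List (Int × Int)) × (List (Int × Int × Int)) :=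
  ([(2, 3), (5, 7), (1, 1)], [(4, 0, 1), (7, 1, 2)])

def Spec_part2 (points : List (Int × Int)) (edges : List (Int × Int × Int)) (out : Int) : Prop := out = part2_alt points edges
instance (points : List (Int × Int)) (edges : List (Int × Int × Int)) (out : Int) : Decidable (Spec_part2 points edges out) := by unfold Spec_part2; infer_instance

-- ===== CLAIM (what is proved, stated in full; the proofs are below) =====
def Claim_equal_part2 : Prop := ∀ (points : List (Int × Int)) (edges : List (Int × Int × Int)), Dom_part2 points edges → Pre_part2 points edges → Spec_part2 points edges (part2 points edges)

-- ===== LEMMAS AND PROOFS =====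

-- iterated parent pointer (proof-only; characterises what find computes)
def iterP (p : List Int) : Nat → Int → Int
  | 0, x => x
  | k+1, x => iterP p k (pg p x)

-- the invariant tying A's parent forest to B's labelling:
-- lengths, parents in range, every chain reaches a root within n steps,
-- labels constant along parent edges, distinct roots carry distinct labels
def InvUF (n : Nat) (p comp : List Int) : Prop :=
  p.length = n ∧ comp.length = n ∧
  (∀ x : Int, 0 ≤ x → x < n → 0 ≤ pg p x ∧ pg p x < n) ∧
  (∀ y : Int, 0 ≤ y → y < n → pg p (iterP p n y) = iterP p n y) ∧
  (∀ x : Int, 0 ≤ x → x < n → pg comp (pg p x) = pg comp x) ∧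
  (∀ x y : Int, 0 ≤ x → x < n → 0 ≤ y → y < n →
      pg p x = x → pg p y = y → pg comp x = pg comp y → x = y)

-- B's relabelling step, and the loop's edge reads stated as a predicate: Safe holds when
-- every edge actually read before the break is in range (trailing edges are unconstrained)
def relab (comp : List Int) (ca cb : Int) : List Int :=
  comp.map (fun c => if c = cb then ca else c)

def Safe (n : Nat) : List (Int × Int × Int) → List Int → Int → Prop
  | [], _, _ => True
  | (_, a, b) :: rest, comp, cnt =>
    (-(n : Int) ≤ a ∧ a < n ∧ -(n : Int) ≤ b ∧ b < n) ∧
    (if pg comp a = pg comp b then Safe n rest comp cnt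
     else if cnt - 1 = 1 then True
     else Safe n rest (relab comp (pg comp a) (pg comp b)) (cnt - 1))

-- B's fold without the break (proof-only), used to tie Pre_'s connectivity to the loop
def runC : List Int → List (Int × Int × Int) → List Int
  | comp, [] => comp
  | comp, (_, a, b) :: rest =>
    if pg comp a = pg comp b then runC comp rest
    else runC (relab comp (pg comp a) (pg comp b)) rest

lemma pg_nonneg (p : List Int) (x : Int) (h0 : 0 ≤ x) : pg p x = p.getD x.toNat 0 := by
  unfold pg
  rw [PySem.List.pyGet?_of_nonneg _ h0, List.getD_eq_getElem?_getD]

lemma pg_neg (p : List Int) (x : Int) (h0 : -(p.length : Int) ≤ x) (h1 : x < 0) :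
    pg p x = pg p (x + p.length) := by
  unfold pg
  have hk : x = -(((-x).toNat : Nat) : Int) := by omega
  rw [hk, PySem.List.pyGet?_neg_natCast _ _ (by omega) (by omega),
    PySem.List.pyGet?_of_nonneg _ (by omega)]
  congr 2
  omega

lemma setI_len (p : List Int) (x v : Int) : (setI p x v).length = p.length := by
  simp [setI]

lemma setI_neg (p : List Int) (x v : Int) (h0 : -(p.length : Int) ≤ x) (h1 : x < 0) :
    setI p x v = setI p (x + p.length) v := by
  unfold setI slot
  rw [if_pos h1, if_neg (by omega)]

lemma pg_setI_self (p : List Int) (x v : Int) (h0 : 0 ≤ x) (h1 : x < p.length) :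
    pg (setI p x v) x = v := by
  rw [pg_nonneg _ _ h0]
  unfold setI slot
  rw [if_neg (by omega)]
  simp only [List.getD_eq_getElem?_getD]
  rw [List.getElem?_set_self (by omega)]
  rfl

lemma pg_setI_other (p : List Int) (x v z : Int) (h0 : 0 ≤ x) (h1 : x < p.length)
    (hz : 0 ≤ z) (hne : z ≠ x) : pg (setI p x v) z = pg p z := by
  rw [pg_nonneg _ _ hz, pg_nonneg _ _ hz]
  unfold setI slot
  rw [if_neg (by omega)]
  simp only [List.getD_eq_getElem?_getD]
  rw [List.getElem?_set_ne (by omega)]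

lemma iterP_succ' (p : List Int) (k : Nat) (x : Int) :
    iterP p (k + 1) x = pg p (iterP p k x) := by
  induction k generalizing x with
  | zero => simp [iterP]
  | succ k ih => rw [iterP]; rw [ih]; rfl

lemma iterP_add (p : List Int) (j k : Nat) (x : Int) :
    iterP p (j + k) x = iterP p k (iterP p j x) := by
  induction j generalizing x with
  | zero => simp [iterP]
  | succ j ih => rw [Nat.succ_add, iterP, ih]; rfl

lemma iterP_fix (p : List Int) (r : Int) (hr : pg p r = r) (k : Nat) : iterP p k r = r := by
  induction k with
  | zero => rfl
  | succ k ih => rw [iterP, hr, ih]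

lemma iterP_stable (p : List Int) (z r : Int) (k m : Nat) (hk : iterP p k z = r)
    (hr : pg p r = r) (hkm : k ≤ m) : iterP p m z = r := by
  obtain ⟨t, rfl⟩ := Nat.exists_eq_add_of_le hkm
  rw [iterP_add, hk, iterP_fix p r hr]

lemma iterP_inR (n : Nat) (p : List Int)
    (hR : ∀ x : Int, 0 ≤ x → x < n → 0 ≤ pg p x ∧ pg p x < n)
    (y : Int) (h0 : 0 ≤ y) (h1 : y < n) (k : Nat) (hk : 0 < k) :
    0 ≤ iterP p k y ∧ iterP p k y < n := by
  induction k generalizing y with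
  | zero => omega
  | succ k ih =>
    rcases Nat.eq_zero_or_pos k with hk0 | hk0
    · subst hk0; rw [iterP]; exact hR y h0 h1
    · rw [iterP]; exact ih (pg p y) (hR y h0 h1).1 (hR y h0 h1).2 hk0

lemma iterP_label (n : Nat) (p comp : List Int)
    (hR : ∀ x : Int, 0 ≤ x → x < n → 0 ≤ pg p x ∧ pg p x < n)
    (hC : ∀ x : Int, 0 ≤ x → x < n → pg comp (pg p x) = pg comp x)
    (y : Int) (h0 : 0 ≤ y) (h1 : y < n) (k : Nat) :
    pg comp (iterP p k y) = pg comp y := by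
  induction k generalizing y with
  | zero => rfl
  | succ k ih =>
    rw [iterP]
    rw [ih (pg p y) (hR y h0 h1).1 (hR y h0 h1).2, hC y h0 h1]

-- compression step: p1 := p[x] = p[p[x]] (x a non-root in range) keeps the whole invariant
-- and the root set, and chains keep reaching the same roots
lemma compress_spec (n : Nat) (p comp : List Int) (x : Int)
    (hlen : p.length = n)
    (hR : ∀ x : Int, 0 ≤ x → x < n → 0 ≤ pg p x ∧ pg p x < n)
    (hB : ∀ y : Int, 0 ≤ y → y < n → pg p (iterP p n y) = iterP p n y)
    (hC : ∀ x : Int, 0 ≤ x → x < n → pg comp (pg p x) = pg comp x)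
    (h0 : 0 ≤ x) (h1 : x < n) (hnr : pg p x ≠ x) :
    (setI p x (pg p (pg p x))).length = n ∧
    (∀ z : Int, 0 ≤ z → z < n → 0 ≤ pg (setI p x (pg p (pg p x))) z ∧ pg (setI p x (pg p (pg p x))) z < n) ∧
    (∀ y : Int, 0 ≤ y → y < n → pg (setI p x (pg p (pg p x))) (iterP (setI p x (pg p (pg p x))) n y) = iterP (setI p x (pg p (pg p x))) n y) ∧
    (∀ z : Int, 0 ≤ z → z < n → pg comp (pg (setI p x (pg p (pg p x))) z) = pg comp z) ∧
    (∀ z : Int, 0 ≤ z → z < n → (pg (setI p x (pg p (pg p x))) z = z ↔ pg p z = z)) ∧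
    (∀ k : Nat, ∀ z r : Int, 0 ≤ z → z < n → iterP p k z = r → pg p r = r →
        iterP (setI p x (pg p (pg p x))) k z = r) := by
  have hpx := hR x h0 h1
  have hv := hR _ hpx.1 hpx.2
  set v := pg p (pg p x) with hvdef
  set q := setI p x v with hqdef
  have hql : q.length = n := by rw [hqdef, setI_len, hlen]
  have hq_self : pg q x = v := pg_setI_self p x v h0 (by omega)
  have hq_other : ∀ z : Int, 0 ≤ z → z ≠ x → pg q z = pg p z := fun z hz hne =>
    pg_setI_other p x v z h0 (by omega) hz hne
  -- the compressed pointer cannot create a 2-cycle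
  have hvx : v ≠ x := by
    intro hvx
    have chain : ∀ k : Nat, iterP p k x = x ∨ iterP p k x = pg p x := by
      intro k
      induction k with
      | zero => left; rfl
      | succ k ih =>
        rw [iterP_succ']
        rcases ih with h | h
        · rw [h]; right; rfl
        · rw [h]; left; rw [← hvdef, hvx]
    rcases chain n with h | h
    · have := hB x h0 h1; rw [h] at this; exact hnr this
    · have := hB x h0 h1
      rw [h, ← hvdef, hvx] at this
      exact hnr this.symm
  -- roots are unchanged
  have hroots : ∀ z : Int, 0 ≤ z → z < n → (pg q z = z ↔ pg p z = z) := by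
    intro z hz0 hz1
    by_cases hzx : z = x
    · subst hzx
      constructor
      · intro h; rw [hq_self] at h; exact absurd h hvx
      · intro h; exact absurd h hnr
    · rw [hq_other z hz0 hzx]
  -- chains transfer to the compressed array
  have htrans : ∀ k : Nat, ∀ z r : Int, 0 ≤ z → z < n → iterP p k z = r → pg p r = r →
      iterP q k z = r := by
    intro k
    induction k with
    | zero => intro z r _ _ h _; exact h
    | succ k ih =>
      intro z r hz0 hz1 hk hr
      rw [iterP] at hk ⊢
      have hrx : r ≠ x := by intro h; rw [h] at hr; exact hnr hr
      by_cases hzx : z = x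
      · rw [hzx] at hk ⊢
        rw [hq_self]
        by_cases h2 : pg p (pg p x) = pg p x
        · have hreq : r = pg p x := by
            rw [iterP_fix p _ h2 k] at hk; omega
          have : v = r := by rw [hvdef, h2, hreq]
          rw [this]
          exact iterP_fix q r (by rw [hq_other r (by rw [← hk]; rw [iterP_fix p _ h2 k]; exact hpx.1) hrx]; exact hr) k
        · cases k with
          | zero =>
            rw [iterP] at hk
            exact absurd (by rw [hk]; exact hr) h2
          | succ k' =>
            rw [iterP] at hk
            have hst : iterP p (k' + 1) v = r :=
              iterP_stable p v r k' (k' + 1) hk hr (by omega)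
            exact ih v r hv.1 hv.2 hst hr
      · rw [hq_other z hz0 hzx]
        exact ih (pg p z) r (hR z hz0 hz1).1 (hR z hz0 hz1).2 hk hr
  refine ⟨hql, ?_, ?_, ?_, hroots, htrans⟩
  · intro z hz0 hz1
    by_cases hzx : z = x
    · subst hzx; rw [hq_self]; exact hv
    · rw [hq_other z hz0 hzx]; exact hR z hz0 hz1
  · intro y hy0 hy1
    have hroot := hB y hy0 hy1
    have hiter := htrans n y (iterP p n y) hy0 hy1 rfl hroot
    rw [hiter]
    have hrx : iterP p n y ≠ x := by intro h; rw [h] at hroot; exact hnr hroot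
    have hrange := iterP_inR n p hR y hy0 hy1 n ?_
    · rw [hq_other _ hrange.1 hrx]; exact hroot
    · by_contra hn0
      have : n = 0 := by omega
      omega
  · intro z hz0 hz1
    by_cases hzx : z = x
    · subst hzx
      rw [hq_self, hvdef, hC _ hpx.1 hpx.2, hC _ hz0 hz1]
    · rw [hq_other z hz0 hzx]; exact hC z hz0 hz1

-- find specification: with enough fuel (a root within 'fuel' steps) find returns that root
-- and preserves the invariant, the labelling relation and the root set
lemma findA_spec (n : Nat) (comp : List Int) : ∀ (fuel : Nat) (p : List Int) (x : Int),
    p.length = n →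
    (∀ x : Int, 0 ≤ x → x < n → 0 ≤ pg p x ∧ pg p x < n) →
    (∀ y : Int, 0 ≤ y → y < n → pg p (iterP p n y) = iterP p n y) →
    (∀ x : Int, 0 ≤ x → x < n → pg comp (pg p x) = pg comp x) →
    0 ≤ x → x < n →
    pg p (iterP p fuel x) = iterP p fuel x →
    (findA p x fuel).1 = iterP p fuel x ∧
    (findA p x fuel).2.length = n ∧
    (∀ z : Int, 0 ≤ z → z < n → 0 ≤ pg (findA p x fuel).2 z ∧ pg (findA p x fuel).2 z < n) ∧
    (∀ y : Int, 0 ≤ y → y < n → pg (findA p x fuel).2 (iterP (findA p x fuel).2 n y) = iterP (findA p x fuel).2 n y) ∧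
    (∀ z : Int, 0 ≤ z → z < n → pg comp (pg (findA p x fuel).2 z) = pg comp z) ∧
    (∀ z : Int, 0 ≤ z → z < n → (pg (findA p x fuel).2 z = z ↔ pg p z = z)) := by
  intro fuel
  induction fuel with
  | zero =>
    intro p x hlen hR hB hC hx0 hx1 hroot
    exact ⟨rfl, hlen, hR, hB, hC, fun z _ _ => Iff.rfl⟩
  | succ fuel ih =>
    intro p x hlen hR hB hC hx0 hx1 hroot
    by_cases hr0 : pg p x = x
    · have hfix : iterP p (fuel + 1) x = x := iterP_fix p x hr0 (fuel + 1)
      simp only [findA, if_pos hr0]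
      exact ⟨hfix.symm, hlen, hR, hB, hC, fun z _ _ => by simp⟩
    · obtain ⟨hql, hqR, hqB, hqC, hqroots, hqtrans⟩ :=
        compress_spec n p comp x hlen hR hB hC hx0 hx1 hr0
      set v := pg p (pg p x) with hvdef
      set q := setI p x v with hqdef
      have hpx := hR x hx0 hx1
      have hvrange := hR _ hpx.1 hpx.2
      have hqx : pg q x = v := pg_setI_self p x v hx0 (by omega)
      have hroot' : pg p (iterP p (fuel + 1) x) = iterP p (fuel + 1) x := hroot
      have hstep : iterP p (fuel + 1) x = iterP p fuel (pg p x) := rfl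
      have hfv : iterP p fuel v = iterP p (fuel + 1) x := by
        by_cases h2 : pg p (pg p x) = pg p x
        · have hr : iterP p (fuel + 1) x = pg p x := by
            rw [hstep, iterP_fix p _ h2 fuel]
          rw [hr]
          have : v = pg p x := by rw [hvdef, h2]
          rw [this, iterP_fix p _ h2 fuel]
        · cases fuel with
          | zero =>
            exfalso
            rw [hstep] at hroot'
            exact h2 hroot'
          | succ f =>
            have hk : iterP p (f + 1 + 1) x = iterP p f v := by
              rw [hstep]; rfl
            exact iterP_stable p v _ f (f + 1) (by rw [← hk]) hroot' (by omega)
      have hrrange : 0 ≤ iterP p (fuel + 1) x ∧ iterP p (fuel + 1) x < n :=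
        iterP_inR n p hR x hx0 hx1 (fuel + 1) (by omega)
      have hrx : iterP p (fuel + 1) x ≠ x := by
        intro h; rw [h] at hroot'; exact hr0 hroot'
      have hqr : pg q (iterP p (fuel + 1) x) = iterP p (fuel + 1) x := by
        rw [hqdef, pg_setI_other p x v _ hx0 (by omega) hrrange.1 hrx]
        exact hroot'
      have hqiter : iterP q fuel v = iterP p (fuel + 1) x :=
        hqtrans fuel v _ hvrange.1 hvrange.2 hfv hroot'
      obtain ⟨ih1, ih2, ih3, ih4, ih5, ih6⟩ :=
        ih q v hql hqR hqB hqC hvrange.1 hvrange.2 (by rw [hqiter]; exact hqr)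
      have heq : findA p x (fuel + 1) = findA q v fuel := by
        simp only [findA, if_neg hr0]
        rw [← hqdef, hqx]
      rw [heq]
      refine ⟨by rw [ih1, hqiter], ih2, ih3, ih4, ih5, fun z hz0 hz1 => ?_⟩
      exact (ih6 z hz0 hz1).trans (hqroots z hz0 hz1)

-- pigeonhole: some root is reached in < n steps (the chain up to the first root is injective)
lemma reach_lt (n : Nat) (p : List Int)
    (hR : ∀ x : Int, 0 ≤ x → x < n → 0 ≤ pg p x ∧ pg p x < n)
    (hB : ∀ y : Int, 0 ≤ y → y < n → pg p (iterP p n y) = iterP p n y)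
    (y : Int) (h0 : 0 ≤ y) (h1 : y < n) :
    ∃ m : Nat, m < n ∧ pg p (iterP p m y) = iterP p m y ∧
      ∀ j : Nat, j < m → pg p (iterP p j y) ≠ iterP p j y := by
  have hEx : ∃ k : Nat, pg p (iterP p k y) = iterP p k y := ⟨n, hB y h0 h1⟩
  classical
  let m := Nat.find hEx
  have hPm : pg p (iterP p m y) = iterP p m y := Nat.find_spec hEx
  have hmin : ∀ j : Nat, j < m → pg p (iterP p j y) ≠ iterP p j y :=
    fun j hj => Nat.find_min hEx hj
  have hrange : ∀ k : Nat, 0 ≤ iterP p k y ∧ iterP p k y < n := by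
    intro k
    cases k with
    | zero => exact ⟨h0, h1⟩
    | succ k => exact iterP_inR n p hR y h0 h1 (k + 1) (by omega)
  -- the chain up to the first root is injective
  have hinj : ∀ i j : Nat, i < j → j ≤ m → iterP p i y ≠ iterP p j y := by
    intro i j hij hjm heq
    have hadd : iterP p (i + (m - j)) y = iterP p m y := by
      rw [iterP_add, heq, ← iterP_add]
      congr 1
      omega
    have : pg p (iterP p (i + (m - j)) y) = iterP p (i + (m - j)) y := by
      rw [hadd]; exact hPm
    exact hmin (i + (m - j)) (by omega) this
  have hf : Function.Injective (fun i : Fin (m + 1) =>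
      (⟨(iterP p i.1 y).toNat, by
        have := hrange i.1
        omega⟩ : Fin n)) := by
    intro i j hij
    simp only [Fin.mk.injEq] at hij
    have hi := hrange i.1
    have hj := hrange j.1
    have heq : iterP p i.1 y = iterP p j.1 y := by omega
    rcases Nat.lt_trichotomy i.1 j.1 with h | h | h
    · exact absurd heq (hinj i.1 j.1 h (by omega))
    · exact Fin.ext h
    · exact absurd heq.symm (hinj j.1 i.1 h (by omega))
  have hcard : m + 1 ≤ n := by
    have := Fintype.card_le_of_injective _ hf
    simpa using this
  exact ⟨m, by omega, hPm, hmin⟩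

-- the union write p2[child] = parent (both roots, distinct) keeps chains rooted within n steps
lemma link_B3 (n : Nat) (p : List Int) (c d : Int)
    (hlen : p.length = n)
    (hR : ∀ x : Int, 0 ≤ x → x < n → 0 ≤ pg p x ∧ pg p x < n)
    (hB : ∀ y : Int, 0 ≤ y → y < n → pg p (iterP p n y) = iterP p n y)
    (hc0 : 0 ≤ c) (hc1 : c < n) (hd0 : 0 ≤ d) (hd1 : d < n)
    (hcr : pg p c = c) (hdr : pg p d = d) (hcd : c ≠ d) :
    ∀ y : Int, 0 ≤ y → y < n → pg (setI p c d) (iterP (setI p c d) n y) = iterP (setI p c d) n y := by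
  set q := setI p c d with hqdef
  have hq_self : pg q c = d := pg_setI_self p c d hc0 (by omega)
  have hq_other : ∀ z : Int, 0 ≤ z → z ≠ c → pg q z = pg p z := fun z hz hne =>
    pg_setI_other p c d z hc0 (by omega) hz hne
  have hdq : pg q d = d := by rw [hq_other d hd0 (Ne.symm hcd)]; exact hdr
  -- chains whose intermediate nodes are non-roots transfer unchanged
  have htrans : ∀ (mk : Nat) (z r : Int), 0 ≤ z → z < n → iterP p mk z = r →
      (∀ j : Nat, j < mk → pg p (iterP p j z) ≠ iterP p j z) → iterP q mk z = r := by
    intro mk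
    induction mk with
    | zero => intro z r _ _ h _; exact h
    | succ mk ih =>
      intro z r hz0 hz1 hk hnr
      have hznr : pg p z ≠ z := hnr 0 (by omega)
      have hzc : z ≠ c := by intro h; rw [h] at hznr; exact hznr hcr
      rw [iterP] at hk ⊢
      rw [hq_other z hz0 hzc]
      exact ih (pg p z) r (hR z hz0 hz1).1 (hR z hz0 hz1).2 hk
        (fun j hj => hnr (j + 1) (by omega))
  intro y hy0 hy1
  obtain ⟨m, hmn, hPm, hmin⟩ := reach_lt n p hR hB y hy0 hy1
  have hqm : iterP q m y = iterP p m y := htrans m y _ hy0 hy1 rfl hmin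
  by_cases hrc : iterP p m y = c
  · have hq1 : iterP q (m + 1) y = d := by
      rw [iterP_succ', hqm, hrc, hq_self]
    have := iterP_stable q y d (m + 1) n hq1 hdq (by omega)
    rw [this]; exact hdq
  · have hqr : pg q (iterP p m y) = iterP p m y := by
      have hrange : 0 ≤ iterP p m y ∧ iterP p m y < n := by
        cases m with
        | zero => exact ⟨hy0, hy1⟩
        | succ k => exact iterP_inR n p hR y hy0 hy1 (k + 1) (by omega)
      rw [hq_other _ hrange.1 hrc]; exact hPm
    have := iterP_stable q y (iterP p m y) m n hqm hqr (by omega)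
    rw [this]; exact hqr

-- merging: after the union write and B's relabelling the whole invariant holds again
lemma merge_inv (n : Nat) (p comp : List Int) (ra rb c d : Int)
    (hInv : InvUF n p comp)
    (hra0 : 0 ≤ ra) (hra1 : ra < n) (hrb0 : 0 ≤ rb) (hrb1 : rb < n)
    (hrar : pg p ra = ra) (hrbr : pg p rb = rb) (hne : ra ≠ rb)
    (hcd : (c = ra ∧ d = rb) ∨ (c = rb ∧ d = ra)) :
    InvUF n (setI p c d) (comp.map (fun l => if l = pg comp rb then pg comp ra else l)) := by
  obtain ⟨hpl, hcl, hR, hB, hC4, hC5⟩ := hInv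
  have hlab : pg comp ra ≠ pg comp rb := fun h =>
    hne (hC5 ra rb hra0 hra1 hrb0 hrb1 hrar hrbr h)
  have hc0 : 0 ≤ c := by rcases hcd with ⟨h1, _⟩ | ⟨h1, _⟩ <;> rw [h1] <;> assumption
  have hc1 : c < n := by rcases hcd with ⟨h1, _⟩ | ⟨h1, _⟩ <;> rw [h1] <;> assumption
  have hd0 : 0 ≤ d := by rcases hcd with ⟨_, h1⟩ | ⟨_, h1⟩ <;> rw [h1] <;> assumption
  have hd1 : d < n := by rcases hcd with ⟨_, h1⟩ | ⟨_, h1⟩ <;> rw [h1] <;> assumption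
  have hcr : pg p c = c := by rcases hcd with ⟨h1, _⟩ | ⟨h1, _⟩ <;> rw [h1] <;> assumption
  have hdr : pg p d = d := by rcases hcd with ⟨_, h1⟩ | ⟨_, h1⟩ <;> rw [h1] <;> assumption
  have hcdne : c ≠ d := by
    rcases hcd with ⟨h1, h2⟩ | ⟨h1, h2⟩ <;> rw [h1, h2]
    · exact hne
    · exact (Ne.symm hne)
  set f : Int → Int := fun l => if l = pg comp rb then pg comp ra else l with hfdef
  have hfca : f (pg comp ra) = pg comp ra := by rw [hfdef]; simp [hlab]
  have hfcb : f (pg comp rb) = pg comp ra := by rw [hfdef]; simp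
  have hmap : ∀ z : Int, 0 ≤ z → z < n → pg (comp.map f) z = f (pg comp z) := by
    intro z hz0 hz1
    rw [pg_nonneg _ _ hz0, pg_nonneg _ _ hz0]
    have h : z.toNat < comp.length := by omega
    simp [List.getD_eq_getElem?_getD, List.getElem?_eq_getElem h]
  have hq_self : pg (setI p c d) c = d := pg_setI_self p c d hc0 (by omega)
  have hq_other : ∀ z : Int, 0 ≤ z → z ≠ c → pg (setI p c d) z = pg p z := fun z hz hne' =>
    pg_setI_other p c d z hc0 (by omega) hz hne'
  refine ⟨by rw [setI_len, hpl], by simp [hcl], ?_, ?_, ?_, ?_⟩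
  · intro z hz0 hz1
    by_cases hzc : z = c
    · rw [hzc, hq_self]; exact ⟨hd0, hd1⟩
    · rw [hq_other z hz0 hzc]; exact hR z hz0 hz1
  · exact link_B3 n p c d hpl hR hB hc0 hc1 hd0 hd1 hcr hdr hcdne
  · intro z hz0 hz1
    by_cases hzc : z = c
    · rw [hzc, hq_self, hmap d hd0 hd1, hmap c hc0 hc1]
      rcases hcd with ⟨h1, h2⟩ | ⟨h1, h2⟩ <;> rw [h1, h2] <;> rw [hfca, hfcb]
    · rw [hq_other z hz0 hzc]
      have hw := hR z hz0 hz1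
      rw [hmap _ hw.1 hw.2, hmap z hz0 hz1, hC4 z hz0 hz1]
  · intro x y hx0 hx1 hy0 hy1 hxr hyr hlabeq
    have hxc : x ≠ c := by
      intro h; rw [h, hq_self] at hxr; exact hcdne hxr.symm
    have hyc : y ≠ c := by
      intro h; rw [h, hq_self] at hyr; exact hcdne hyr.symm
    rw [hq_other x hx0 hxc] at hxr
    rw [hq_other y hy0 hyc] at hyr
    rw [hmap x hx0 hx1, hmap y hy0 hy1] at hlabeq
    by_cases h1 : pg comp x = pg comp rb
    · have hxrb : x = rb := hC5 x rb hx0 hx1 hrb0 hrb1 hxr hrbr h1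
      have hcra : c = ra ∧ d = rb := by
        rcases hcd with h | h
        · exact h
        · exfalso; exact hxc (by rw [hxrb, h.1])
      rw [hfdef] at hlabeq
      simp only [if_pos h1] at hlabeq
      by_cases h2 : pg comp y = pg comp rb
      · rw [hxrb]; exact (hC5 y rb hy0 hy1 hrb0 hrb1 hyr hrbr h2).symm ▸ rfl
      · exfalso
        simp only [if_neg h2] at hlabeq
        have : y = ra := hC5 y ra hy0 hy1 hra0 hra1 hyr hrar hlabeq.symm
        exact hyc (by rw [this, hcra.1])
    · by_cases h2 : pg comp y = pg comp rb
      · have hyrb : y = rb := hC5 y rb hy0 hy1 hrb0 hrb1 hyr hrbr h2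
        have hcra : c = ra ∧ d = rb := by
          rcases hcd with h | h
          · exact h
          · exfalso; exact hyc (by rw [hyrb, h.1])
        rw [hfdef] at hlabeq
        simp only [if_neg h1, if_pos h2] at hlabeq
        exfalso
        have : x = ra := hC5 x ra hx0 hx1 hra0 hra1 hxr hrar hlabeq
        exact hxc (by rw [this, hcra.1])
      · rw [hfdef] at hlabeq
        simp only [if_neg h1, if_neg h2] at hlabeq
        exact hC5 x y hx0 hx1 hy0 hy1 hxr hyr hlabeq

-- a no-op write p[i] = p[i] leaves the list unchanged
lemma setI_id (p : List Int) (x : Int) (h0 : 0 ≤ x) (h1 : x < p.length)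
    (hr : pg p x = x) : setI p x x = p := by
  rw [pg_nonneg _ _ h0] at hr
  unfold setI slot
  rw [if_neg (by omega)]
  apply List.ext_getElem?
  intro j
  by_cases hj : j = x.toNat
  · rw [hj, List.getElem?_set_self (by omega), List.getElem?_eq_getElem (by omega : x.toNat < p.length)]
    rw [List.getD_eq_getElem?_getD, List.getElem?_eq_getElem (by omega : x.toNat < p.length)] at hr
    simp only [Option.getD_some] at hr
    rw [hr]
  · rw [List.getElem?_set_ne (fun h => hj h.symm)]

-- find with fuel n+1 from any admissible (possibly negative) start index:
-- returns a root carrying the start's label and preserves the invariant and the root set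
lemma findA_any (n : Nat) (comp : List Int) (p : List Int) (x : Int)
    (hlen : p.length = n) (hclen : comp.length = n)
    (hR : ∀ x : Int, 0 ≤ x → x < n → 0 ≤ pg p x ∧ pg p x < n)
    (hB : ∀ y : Int, 0 ≤ y → y < n → pg p (iterP p n y) = iterP p n y)
    (hC : ∀ x : Int, 0 ≤ x → x < n → pg comp (pg p x) = pg comp x)
    (hx0 : -(n : Int) ≤ x) (hx1 : x < n) :
    0 ≤ (findA p x (n + 1)).1 ∧ (findA p x (n + 1)).1 < n ∧
    pg (findA p x (n + 1)).2 (findA p x (n + 1)).1 = (findA p x (n + 1)).1 ∧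
    pg comp (findA p x (n + 1)).1 = pg comp x ∧
    (findA p x (n + 1)).2.length = n ∧
    (∀ z : Int, 0 ≤ z → z < n → 0 ≤ pg (findA p x (n + 1)).2 z ∧ pg (findA p x (n + 1)).2 z < n) ∧
    (∀ y : Int, 0 ≤ y → y < n → pg (findA p x (n + 1)).2 (iterP (findA p x (n + 1)).2 n y) = iterP (findA p x (n + 1)).2 n y) ∧
    (∀ z : Int, 0 ≤ z → z < n → pg comp (pg (findA p x (n + 1)).2 z) = pg comp z) ∧
    (∀ z : Int, 0 ≤ z → z < n → (pg (findA p x (n + 1)).2 z = z ↔ pg p z = z)) := by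
  by_cases hxneg : 0 ≤ x
  · have hBx := hB x hxneg hx1
    have hiter : iterP p (n + 1) x = iterP p n x := by rw [iterP_succ', hBx]
    have hroot : pg p (iterP p (n + 1) x) = iterP p (n + 1) x := by rw [hiter]; exact hBx
    obtain ⟨s1, s2, s3, s4, s5, s6⟩ :=
      findA_spec n comp (n + 1) p x hlen hR hB hC hxneg hx1 hroot
    have hrange := iterP_inR n p hR x hxneg hx1 (n + 1) (by omega)
    refine ⟨by rw [s1]; exact hrange.1, by rw [s1]; exact hrange.2, ?_, ?_, s2, s3, s4, s5, s6⟩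
    · rw [s1, (s6 _ hrange.1 hrange.2)]
      exact hroot
    · rw [s1]
      exact iterP_label n p comp hR hC x hxneg hx1 (n + 1)
  · -- negative start: the first loop iteration lands on the wrapped slot
    have hxlt : x < 0 := by omega
    have hn0 : (0 : Int) < n := by omega
    set xn := x + (n : Int) with hxndef
    have hxn0 : 0 ≤ xn := by omega
    have hxn1 : xn < n := by omega
    have hpgneg : pg p x = pg p xn := by
      have := pg_neg p x (by omega) hxlt
      rw [hlen] at this; exact this
    have hcompneg : pg comp x = pg comp xn := by
      have := pg_neg comp x (by omega) hxlt
      rw [hclen] at this; exact this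
    have hpgxn := hR xn hxn0 hxn1
    have hne0 : pg p x ≠ x := by rw [hpgneg]; omega
    have hsetneg : ∀ v : Int, setI p x v = setI p xn v := by
      intro v
      have := setI_neg p x v (by omega) hxlt
      rw [hlen] at this; exact this
    have hunfold : findA p x (n + 1) = findA (setI p xn (pg p (pg p xn)))
        (pg (setI p xn (pg p (pg p xn))) x) n := by
      simp only [findA, if_neg hne0]
      rw [hsetneg, hpgneg]
    by_cases hroot : pg p xn = xn
    · -- wrapped slot is already a root: the write is a no-op
      have hv : pg p (pg p xn) = xn := by rw [hroot, hroot]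
      have hid : setI p xn (pg p (pg p xn)) = p := by
        rw [hv]; exact setI_id p xn hxn0 (by omega) hroot
      rw [hunfold, hid, hpgneg, hroot]
      have hrootIter : pg p (iterP p n xn) = iterP p n xn := hB xn hxn0 hxn1
      obtain ⟨s1, s2, s3, s4, s5, s6⟩ :=
        findA_spec n comp n p xn hlen hR hB hC hxn0 hxn1 hrootIter
      have hfixn : iterP p n xn = xn := iterP_fix p xn hroot n
      refine ⟨by rw [s1, hfixn]; exact hxn0, by rw [s1, hfixn]; exact hxn1, ?_, ?_, s2, s3, s4, s5, s6⟩
      · rw [s1, hfixn, (s6 xn hxn0 hxn1)]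
        exact hroot
      · rw [s1, hfixn, hcompneg]
    · -- wrapped slot is not a root: the first step is an ordinary compression
      obtain ⟨hql, hqR, hqB, hqC, hqroots, hqtrans⟩ :=
        compress_spec n p comp xn hlen hR hB hC hxn0 hxn1 hroot
      set v := pg p (pg p xn) with hvdef
      set q := setI p xn v with hqdef
      have hvrange := hR _ hpgxn.1 hpgxn.2
      have hqx : pg q x = v := by
        have h1 : pg q x = pg q xn := by
          have := pg_neg q x (by rw [hql]; omega) hxlt
          rw [hql] at this; exact this
        rw [h1, hqdef]
        exact pg_setI_self p xn v hxn0 (by omega)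
      rw [hunfold, hqx]
      have hrootIter : pg q (iterP q n v) = iterP q n v := hqB v hvrange.1 hvrange.2
      obtain ⟨s1, s2, s3, s4, s5, s6⟩ :=
        findA_spec n comp n q v hql hqR hqB hqC hvrange.1 hvrange.2 hrootIter
      have hrange : 0 ≤ iterP q n v ∧ iterP q n v < n :=
        iterP_inR n q hqR v hvrange.1 hvrange.2 n (by omega)
      refine ⟨by rw [s1]; exact hrange.1, by rw [s1]; exact hrange.2, ?_, ?_, s2, s3, s4, s5,
        fun z hz0 hz1 => (s6 z hz0 hz1).trans (hqroots z hz0 hz1)⟩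
      · rw [s1, (s6 _ hrange.1 hrange.2)]
        exact hrootIter
      · rw [s1, iterP_label n q comp hqR hqC v hvrange.1 hvrange.2 n, hcompneg,
          hvdef, hC _ hpgxn.1 hpgxn.2, hC xn hxn0 hxn1]

-- one edge step: A's union merges exactly when B's labels differ; Safe supplies the range
-- of every edge actually read, so both sides keep lock-step up to the break
lemma loop_eq (n : Nat) : ∀ (edges : List (Int × Int × Int)) (p size comp : List Int)
    (cnt : Int) (last : Option (Int × Int)),
    Safe n edges comp cnt →
    InvUF n p comp →
    (loopA edges p size cnt last).2.2.2 = (loopB edges comp cnt last).2.2 := by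
  intro edges
  induction edges with
  | nil => intro p size comp cnt last _ _; rfl
  | cons e rest ih =>
    obtain ⟨w, a, b⟩ := e
    intro p size comp cnt last hsafe hInv
    obtain ⟨⟨ha1, ha2, hb1, hb2⟩, hbranch⟩ := hsafe
    obtain ⟨hpl, hcl, hR, hB, hC4, hC5⟩ := hInv
    obtain ⟨hra0, hra1, hrar1, hlaba, hp1l, hR1, hB1, hC41, hroots1⟩ :=
      findA_any n comp p a hpl hcl hR hB hC4 ha1 ha2
    obtain ⟨hrb0, hrb1, hrbr2, hlabb, hp2l, hR2, hB2, hC42, hroots2⟩ :=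
      findA_any n comp (findA p a (n + 1)).2 b hp1l hcl hR1 hB1 hC41 hb1 hb2
    set ra := (findA p a (n + 1)).1 with hradef
    set p1 := (findA p a (n + 1)).2 with hp1def
    set rb := (findA p1 b (n + 1)).1 with hrbdef
    set p2 := (findA p1 b (n + 1)).2 with hp2def
    have hrar2 : pg p2 ra = ra := (hroots2 ra hra0 hra1).mpr hrar1
    have hC52 : ∀ x y : Int, 0 ≤ x → x < n → 0 ≤ y → y < n →
        pg p2 x = x → pg p2 y = y → pg comp x = pg comp y → x = y := by
      intro x y hx0 hx1 hy0 hy1 hxr hyr hl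
      exact hC5 x y hx0 hx1 hy0 hy1
        ((hroots1 x hx0 hx1).mp ((hroots2 x hx0 hx1).mp hxr))
        ((hroots1 y hy0 hy1).mp ((hroots2 y hy0 hy1).mp hyr)) hl
    have hun : unionA p size cnt a b =
        if ra = rb then (false, p2, size, cnt)
        else
          let pr := if pg size ra < pg size rb then (rb, ra) else (ra, rb)
          (true, setI p2 pr.2 pr.1, setI size pr.1 (pg size pr.1 + pg size pr.2), cnt - 1) := by
      simp only [unionA]
      rw [hpl]
      rw [← hradef, ← hp1def, hp1l, ← hrbdef, ← hp2def]
    simp only [loopA, loopB, hun]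
    by_cases hab : ra = rb
    · have hcab : pg comp a = pg comp b := by rw [← hlaba, ← hlabb, hab]
      rw [if_pos hcab] at hbranch
      simp only [if_pos hab, if_pos hcab]
      exact ih p2 size comp cnt last hbranch ⟨hp2l, hcl, hR2, hB2, hC42, hC52⟩
    · have hcab : pg comp a ≠ pg comp b := by
        intro h
        exact hab (hC52 ra rb hra0 hra1 hrb0 hrb1 hrar2 hrbr2 (by rw [hlaba, hlabb, h]))
      rw [if_neg hcab] at hbranch
      simp only [if_neg hab, if_neg hcab]
      have hcd : ((if pg size ra < pg size rb then (rb, ra) else (ra, rb)).2 = ra ∧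
          (if pg size ra < pg size rb then (rb, ra) else (ra, rb)).1 = rb) ∨
          ((if pg size ra < pg size rb then (rb, ra) else (ra, rb)).2 = rb ∧
          (if pg size ra < pg size rb then (rb, ra) else (ra, rb)).1 = ra) := by
        by_cases hsz : pg size ra < pg size rb
        · simp [hsz]
        · simp [hsz]
      have hm := merge_inv n p2 comp ra rb
        (if pg size ra < pg size rb then (rb, ra) else (ra, rb)).2
        (if pg size ra < pg size rb then (rb, ra) else (ra, rb)).1
        ⟨hp2l, hcl, hR2, hB2, hC42, hC52⟩ hra0 hra1 hrb0 hrb1 hrar2 hrbr2 hab hcd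
      rw [hlaba, hlabb] at hm
      by_cases hcnt : cnt - 1 = 1
      · simp [hcnt]
      · rw [if_neg hcnt] at hbranch
        simp only [if_neg hcnt]
        simp only [relab] at hbranch
        exact ih _ _ _ _ _ hbranch hm

lemma pg_range_id (n : Nat) (x : Int) (h0 : 0 ≤ x) (h1 : x < n) :
    pg ((List.range n).map Int.ofNat) x = x := by
  have hx : x.toNat < n := by omega
  rw [pg_nonneg _ _ h0]
  simp [List.getD_eq_getElem?_getD, hx]
  omega

-- if every edge is in range the loop never reads out of range: Safe holds outright
lemma Safe_allRange (n : Nat) : ∀ (edges : List (Int × Int × Int)) (comp : List Int) (cnt : Int),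
    (∀ e ∈ edges, -(n : Int) ≤ e.2.1 ∧ e.2.1 < n ∧ -(n : Int) ≤ e.2.2 ∧ e.2.2 < n) →
    Safe n edges comp cnt := by
  intro edges
  induction edges with
  | nil => intro comp cnt _; trivial
  | cons e rest ih =>
    obtain ⟨w, a, b⟩ := e
    intro comp cnt hall
    refine ⟨hall (w, a, b) List.mem_cons_self, ?_⟩
    split_ifs with h1 h2 <;>
      first
        | trivial
        | exact ih _ _ (fun e he => hall e (List.mem_cons_of_mem _ he))

lemma relab_len (comp : List Int) (ca cb : Int) : (relab comp ca cb).length = comp.length := by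
  simp [relab]

lemma runC_len : ∀ (es : List (Int × Int × Int)) (comp : List Int),
    (runC comp es).length = comp.length := by
  intro es
  induction es with
  | nil => intro comp; rfl
  | cons e rest ih =>
    obtain ⟨w, a, b⟩ := e
    intro comp
    simp only [runC]
    split_ifs
    · exact ih comp
    · rw [ih, relab_len]

lemma pg_map (comp : List Int) (f : Int → Int) (x : Int)
    (h0 : -(comp.length : Int) ≤ x) (h1 : x < comp.length) :
    pg (comp.map f) x = f (pg comp x) := by
  by_cases hx : 0 ≤ x
  · rw [pg_nonneg _ _ hx, pg_nonneg _ _ hx]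
    have h : x.toNat < comp.length := by omega
    simp [List.getD_eq_getElem?_getD, List.getElem?_eq_getElem h]
  · have hneg : x < 0 := by omega
    have hl : (comp.map f).length = comp.length := by simp
    rw [pg_neg (comp.map f) x (by rw [hl]; omega) hneg, hl,
        pg_neg comp x (by omega) hneg]
    have hx' : 0 ≤ x + (comp.length : Int) := by omega
    rw [pg_nonneg _ _ hx', pg_nonneg _ _ hx']
    have h : (x + (comp.length : Int)).toNat < comp.length := by omega
    simp [List.getD_eq_getElem?_getD, List.getElem?_eq_getElem h]

lemma pg_mem (comp : List Int) (x : Int)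
    (h0 : -(comp.length : Int) ≤ x) (h1 : x < comp.length) : pg comp x ∈ comp := by
  by_cases hx : 0 ≤ x
  · rw [pg_nonneg _ _ hx]
    have h : x.toNat < comp.length := by omega
    rw [List.getD_eq_getElem?_getD, List.getElem?_eq_getElem h]
    exact List.getElem_mem h
  · have hneg : x < 0 := by omega
    rw [pg_neg comp x h0 hneg]
    have hx' : 0 ≤ x + (comp.length : Int) := by omega
    rw [pg_nonneg _ _ hx']
    have h : (x + (comp.length : Int)).toNat < comp.length := by omega
    rw [List.getD_eq_getElem?_getD, List.getElem?_eq_getElem h]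
    exact List.getElem_mem h

-- a merge of two present, distinct labels shrinks the label set by exactly the old label
lemma relab_toFinset (comp : List Int) (ca cb : Int)
    (hca : ca ∈ comp) (hne : ca ≠ cb) :
    (relab comp ca cb).toFinset = comp.toFinset.erase cb := by
  apply Finset.ext
  intro x
  simp only [relab, List.mem_toFinset, List.mem_map, Finset.mem_erase]
  constructor
  · rintro ⟨y, hy, hfy⟩
    by_cases hycb : y = cb
    · subst hycb
      rw [if_pos rfl] at hfy
      exact ⟨by rw [← hfy]; exact hne, by rw [← hfy]; exact hca⟩
    · simp only [if_neg hycb] at hfy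
      exact ⟨by rw [← hfy]; exact hycb, by rw [← hfy]; exact hy⟩
  · rintro ⟨hxcb, hx⟩
    exact ⟨x, hx, by simp [hxcb]⟩

-- label-equality of two in-range positions is preserved by the rest of the fold
lemma runC_pres : ∀ (es : List (Int × Int × Int)) (comp : List Int) (x y : Int),
    -(comp.length : Int) ≤ x → x < comp.length →
    -(comp.length : Int) ≤ y → y < comp.length →
    pg comp x = pg comp y →
    pg (runC comp es) x = pg (runC comp es) y := by
  intro es
  induction es with
  | nil => intro comp x y _ _ _ _ h; exact h
  | cons e rest ih =>
    obtain ⟨w, a, b⟩ := e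
    intro comp x y hx0 hx1 hy0 hy1 heq
    simp only [runC]
    split_ifs with hcab
    · exact ih comp x y hx0 hx1 hy0 hy1 heq
    · have hl := relab_len comp (pg comp a) (pg comp b)
      apply ih _ x y (by rw [hl]; omega) (by rw [hl]; omega) (by rw [hl]; omega) (by rw [hl]; omega)
      simp only [relab]
      rw [pg_map comp _ x hx0 hx1, pg_map comp _ y hy0 hy1, heq]

-- after the fold, the two endpoints of every in-range processed edge share one label
lemma runC_pair : ∀ (es : List (Int × Int × Int)) (comp : List Int) (e : Int × Int × Int),
    e ∈ es →
    (-(comp.length : Int) ≤ e.2.1 ∧ e.2.1 < comp.length ∧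
     -(comp.length : Int) ≤ e.2.2 ∧ e.2.2 < comp.length) →
    pg (runC comp es) e.2.1 = pg (runC comp es) e.2.2 := by
  intro es
  induction es with
  | nil => intro comp e he _; cases he
  | cons hd rest ih =>
    obtain ⟨w, a, b⟩ := hd
    intro comp e he hrg
    obtain ⟨he1, he2, he3, he4⟩ := hrg
    rcases List.mem_cons.mp he with rfl | hmem
    · -- the head edge: its endpoints become equal after this step, then stay equal
      simp only [runC]
      split_ifs with hcab
      · exact runC_pres rest comp _ _ he1 he2 he3 he4 hcab
      · have hl := relab_len comp (pg comp a) (pg comp b)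
        apply runC_pres rest _ _ _ (by rw [hl]; omega) (by rw [hl]; omega)
          (by rw [hl]; omega) (by rw [hl]; omega)
        simp only [relab]
        rw [pg_map comp _ a he1 he2, pg_map comp _ b he3 he4]
        simp [hcab]
    · simp only [runC]
      split_ifs with hcab
      · exact ih comp e hmem ⟨he1, he2, he3, he4⟩
      · have hl := relab_len comp (pg comp a) (pg comp b)
        exact ih _ e hmem ⟨by rw [hl]; omega, by rw [hl]; omega, by rw [hl]; omega, by rw [hl]; omega⟩

lemma mem_addV (s : List Nat) (v x : Nat) : x ∈ addV s v ↔ x = v ∨ x ∈ s := by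
  unfold addV
  split_ifs with h
  · constructor
    · exact Or.inr
    · rintro (rfl | hx)
      · exact h
      · exact hx
  · exact List.mem_cons

lemma normI_toNat_cast (n : Nat) (x : Int) (h0 : -(n : Int) ≤ x) (h1 : x < n) :
    ((normI n x).toNat : Int) = normI n x := by
  unfold normI
  split_ifs with h <;> omega

lemma pg_normI (comp : List Int) (n : Nat) (hlen : comp.length = n) (x : Int)
    (h0 : -(n : Int) ≤ x) (h1 : x < n) :
    pg comp x = pg comp (normI n x) := by
  unfold normI
  split_ifs with h
  · have := pg_neg comp x (by omega) h
    rw [hlen] at this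
    exact this
  · rfl

-- BFS soundness: every vertex the closure reaches carries vertex 0's final label
lemma grow_inv (R : List Int) (c : Int) : ∀ (ps : List (Nat × Nat)) (s : List Nat),
    (∀ p ∈ ps, pg R (p.1 : Int) = pg R (p.2 : Int)) →
    (∀ v ∈ s, pg R (v : Int) = c) →
    (∀ v ∈ grow ps s, pg R (v : Int) = c) := by
  intro ps
  induction ps with
  | nil => intro s _ hs; exact hs
  | cons p rest ih =>
    intro s hps hs
    have hstep : grow (p :: rest) s =
        grow rest (if p.1 ∈ s ∨ p.2 ∈ s then addV (addV s p.1) p.2 else s) := rfl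
    rw [hstep]
    apply ih _ (fun q hq => hps q (List.mem_cons_of_mem _ hq))
    intro v hv
    by_cases hc : p.1 ∈ s ∨ p.2 ∈ s
    · rw [if_pos hc] at hv
      have hpair := hps p List.mem_cons_self
      have hbase : pg R (p.1 : Int) = c := by
        rcases hc with h | h
        · exact hs p.1 h
        · rw [hpair]; exact hs p.2 h
      rw [mem_addV, mem_addV] at hv
      rcases hv with rfl | rfl | hv
      · rw [← hpair]; exact hbase
      · exact hbase
      · exact hs v hv
    · rw [if_neg hc] at hv
      exact hs v hv

lemma iterate_grow_inv (R : List Int) (ps : List (Nat × Nat))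
    (hps : ∀ p ∈ ps, pg R (p.1 : Int) = pg R (p.2 : Int)) (m : Nat) :
    ∀ v ∈ (grow ps)^[m] [0], pg R (v : Int) = pg R 0 := by
  induction m with
  | zero =>
    intro v hv
    rcases List.mem_singleton.mp hv with rfl
    rfl
  | succ m ih =>
    rw [Function.iterate_succ_apply']
    exact grow_inv R (pg R 0) ps _ hps ih

-- connectivity of an in-range edge prefix forces a single label after B's fold
lemma conn_card (n : Nat) (es : List (Int × Int × Int))
    (hall : ∀ e ∈ es, -(n : Int) ≤ e.2.1 ∧ e.2.1 < n ∧ -(n : Int) ≤ e.2.2 ∧ e.2.2 < n)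
    (hconn : connectedB n es = true) (hn : 1 ≤ n) :
    (runC ((List.range n).map Int.ofNat) es).toFinset.card = 1 := by
  set R := runC ((List.range n).map Int.ofNat) es with hRdef
  have hRlen : R.length = n := by rw [hRdef, runC_len]; simp
  have hps : ∀ p ∈ npairs n es, pg R (p.1 : Int) = pg R (p.2 : Int) := by
    intro p hp
    simp only [npairs, List.mem_map] at hp
    obtain ⟨e, he, rfl⟩ := hp
    obtain ⟨h1, h2, h3, h4⟩ := hall e he
    have hpair := runC_pair es ((List.range n).map Int.ofNat) e he
      (by simp only [List.length_map, List.length_range]; exact ⟨h1, h2, h3, h4⟩)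
    rw [← hRdef] at hpair
    rw [normI_toNat_cast n _ h1 h2, normI_toNat_cast n _ h3 h4]
    calc pg R (normI n e.2.1) = pg R e.2.1 :=
            (pg_normI R n hRlen e.2.1 h1 h2).symm
      _ = pg R e.2.2 := hpair
      _ = pg R (normI n e.2.2) := pg_normI R n hRlen e.2.2 h3 h4
  have hreach : ∀ v : Nat, v < n → pg R (v : Int) = pg R 0 := by
    intro v hv
    simp only [connectedB, List.all_eq_true, List.mem_range, decide_eq_true_eq] at hconn
    exact iterate_grow_inv R (npairs n es) hps n v (hconn v hv)
  -- every entry of R equals pg R 0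
  have hent : ∀ x ∈ R, x = pg R 0 := by
    intro x hx
    obtain ⟨i, hi, rfl⟩ := List.mem_iff_getElem.mp hx
    have : pg R (i : Int) = R[i] := by
      rw [pg_nonneg _ _ (by positivity)]
      simp [List.getD_eq_getElem?_getD, List.getElem?_eq_getElem hi]
    rw [← this]
    exact hreach i (by omega)
  have hc0 : pg R 0 ∈ R := pg_mem R 0 (by omega) (by omega)
  rw [Finset.card_eq_one]
  refine ⟨pg R 0, ?_⟩
  apply Finset.ext
  intro x
  simp only [List.mem_toFinset, Finset.mem_singleton]
  constructor
  · exact hent x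
  · rintro rfl; exact hc0

-- a connected in-range prefix makes the loop break in time: Safe holds
lemma Safe_conn (n : Nat) : ∀ (edges : List (Int × Int × Int)) (k : Nat) (comp : List Int)
    (cnt : Int),
    comp.length = n →
    cnt = (comp.toFinset.card : Int) →
    2 ≤ comp.toFinset.card →
    k ≤ edges.length →
    (∀ e ∈ edges.take k, -(n : Int) ≤ e.2.1 ∧ e.2.1 < n ∧ -(n : Int) ≤ e.2.2 ∧ e.2.2 < n) →
    (runC comp (edges.take k)).toFinset.card = 1 →
    Safe n edges comp cnt := by
  intro edges
  induction edges with
  | nil => intro k comp cnt _ _ _ _ _ _; trivial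
  | cons e rest ih =>
    obtain ⟨w, a, b⟩ := e
    intro k comp cnt hlen hcnt hcard hk htake hrun
    cases k with
    | zero =>
      simp only [List.take_zero, runC] at hrun
      omega
    | succ k' =>
      rw [List.take_succ_cons] at htake hrun
      have hrg := htake (w, a, b) List.mem_cons_self
      obtain ⟨ha1, ha2, hb1, hb2⟩ := hrg
      dsimp only at ha1 ha2 hb1 hb2
      have htake' : ∀ e ∈ rest.take k', -(n : Int) ≤ e.2.1 ∧ e.2.1 < n ∧
          -(n : Int) ≤ e.2.2 ∧ e.2.2 < n :=
        fun e he => htake e (List.mem_cons_of_mem _ he)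
      refine ⟨⟨ha1, ha2, hb1, hb2⟩, ?_⟩
      by_cases hcab : pg comp a = pg comp b
      · rw [if_pos hcab]
        simp only [runC, if_pos hcab] at hrun
        exact ih k' comp cnt hlen hcnt hcard
          (by simp only [List.length_cons] at hk; omega) htake' hrun
      · rw [if_neg hcab]
        have hca_mem : pg comp a ∈ comp := pg_mem comp a (by rw [hlen]; omega) (by rw [hlen]; omega)
        have hcb_mem : pg comp b ∈ comp := pg_mem comp b (by rw [hlen]; omega) (by rw [hlen]; omega)
        have hfin : (relab comp (pg comp a) (pg comp b)).toFinset =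
            comp.toFinset.erase (pg comp b) :=
          relab_toFinset comp (pg comp a) (pg comp b) hca_mem hcab
        have hcard' : (relab comp (pg comp a) (pg comp b)).toFinset.card =
            comp.toFinset.card - 1 := by
          rw [hfin, Finset.card_erase_of_mem (List.mem_toFinset.mpr hcb_mem)]
        by_cases hbreak : cnt - 1 = 1
        · rw [if_pos hbreak]; trivial
        · rw [if_neg hbreak]
          simp only [runC, if_neg hcab] at hrun
          have hge1 : 1 ≤ (relab comp (pg comp a) (pg comp b)).toFinset.card := by
            apply Finset.card_pos.mpr
            refine ⟨pg comp a, ?_⟩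
            rw [hfin]
            exact Finset.mem_erase.mpr ⟨hcab, List.mem_toFinset.mpr hca_mem⟩
          have hc2 : 2 ≤ (relab comp (pg comp a) (pg comp b)).toFinset.card := by
            rcases Nat.lt_or_ge ((relab comp (pg comp a) (pg comp b)).toFinset.card) 2 with h | h
            · exfalso
              apply hbreak
              rw [hcnt]
              rw [hcard'] at h hge1
              omega
            · exact h
          exact ih k' (relab comp (pg comp a) (pg comp b)) (cnt - 1)
            (by rw [relab_len, hlen]) (by rw [hcard', hcnt]; omega) hc2
            (by simp only [List.length_cons] at hk; omega) htake' hrun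

-- ===== VERDICT =====
theorem part2_spec : Claim_equal_part2 := by
  intro points edges _ hPre
  show part2 points edges = part2_alt points edges
  set n := points.length with hn
  have hInv0 : InvUF n ((List.range n).map Int.ofNat) ((List.range n).map Int.ofNat) := by
    refine ⟨by simp, by simp, ?_, ?_, ?_, ?_⟩
    · intro x h0 h1
      rw [pg_range_id n x h0 h1]
      exact ⟨h0, h1⟩
    · intro y h0 h1
      rw [iterP_fix _ y (pg_range_id n y h0 h1) n]
      exact pg_range_id n y h0 h1
    · intro x h0 h1
      rw [pg_range_id n x h0 h1]
      exact pg_range_id n x h0 h1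
    · intro x y h0 h1 h2 h3 _ _ h
      rw [pg_range_id n x h0 h1, pg_range_id n y h2 h3] at h
      exact h
  -- Pre_ yields Safe for the initial state
  have hsafe : Safe n edges ((List.range n).map Int.ofNat) (n : Int) := by
    simp only [Pre_part2, Bool.or_eq_true, Bool.and_eq_true, List.all_eq_true,
      List.any_eq_true, List.mem_range, decide_eq_true_eq, inRangeE] at hPre
    rcases hPre with ⟨hall, _⟩ | ⟨h2n, k, hklt, htake, hconn⟩
    · exact Safe_allRange n edges _ (n : Int) (fun e he => hall e he)
    · have hcard0 : (((List.range n).map Int.ofNat).toFinset.card) = n := by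
        rw [List.toFinset_card_of_nodup (List.Nodup.map (fun _ _ h => Int.ofNat.inj h)
          (List.nodup_range))]
        simp
      apply Safe_conn n edges k _ (n : Int) (by simp) (by rw [hcard0]) (by omega)
        (le_of_lt hklt) (fun e he => htake e he)
      exact conn_card n (edges.take k) (fun e he => htake e he) hconn (by omega)
  have hloop := loop_eq n edges ((List.range n).map Int.ofNat)
    (List.replicate n 1) ((List.range n).map Int.ofNat) (n : Int) none hsafe hInv0
  simp only [part2, part2_alt, ← hn]
  rw [hloop]
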